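-- pv_equiv track=rewrite | github.com/vaibhav-jain-dev/learning-algo | problems/200-must-solve/arrays/04-tournament-winner/similar/03-min-matches-guarantee/python_code.py | min_matches_to_guarantee_winner
-- ===== SOURCE A (Python) =====
-- from typing import List
--
-- def min_matches_to_guarantee_winner(scores: List[int]) -> int:
--     """Find minimum matches needed to guarantee a winner."""
--     if len(scores) <= 1:
--         return 0
--
--     sorted_scores = sorted(scores, reverse=True)
--     max_score = sorted_scores[0]
--     matches = 0
--
--     # Check if anyone can catch the leader
--     for score in sorted_scores[1:]:
--         if score + 3 >= max_score:
--             # This team can still potentially tie/win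
--             matches += 1
--             max_score += 3
--
--     return matches
-- ===== SOURCE B (Python) =====
-- def min_matches_to_guarantee_winner(scores):
--     """Find minimum matches needed to guarantee a winner."""
--     if len(scores) <= 1:
--         return 0
--     s = sorted(scores, reverse=True)
--
--     def ok(i):
--         # team at 1-based index i can still catch the leader after the
--         # i-1 earlier challengers each gained 3 points
--         return s[i] + 3 >= s[0] + 3 * (i - 1)
--
--     if not ok(1):
--         return 0
--     lo, hi = 1, len(s) - 1
--     while lo < hi:
--         mid = (lo + hi + 1) // 2
--         if ok(mid):
--             lo = mid
--         else:
--             hi = mid - 1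
--     return lo
-- ===== Notes on version B (the rewrite author's own statement) =====
-- stated objective: alternative
-- what changed: Replaces A's running-accumulator scan of the sorted tail by a binary search for the largest 1-based index i with s[i] + 3 >= s[0] + 3*(i-1), a predicate that is monotone on the descending-sorted list; no running max_score is maintained and after sorting only O(log n) positions are inspected.
import Mathlib
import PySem

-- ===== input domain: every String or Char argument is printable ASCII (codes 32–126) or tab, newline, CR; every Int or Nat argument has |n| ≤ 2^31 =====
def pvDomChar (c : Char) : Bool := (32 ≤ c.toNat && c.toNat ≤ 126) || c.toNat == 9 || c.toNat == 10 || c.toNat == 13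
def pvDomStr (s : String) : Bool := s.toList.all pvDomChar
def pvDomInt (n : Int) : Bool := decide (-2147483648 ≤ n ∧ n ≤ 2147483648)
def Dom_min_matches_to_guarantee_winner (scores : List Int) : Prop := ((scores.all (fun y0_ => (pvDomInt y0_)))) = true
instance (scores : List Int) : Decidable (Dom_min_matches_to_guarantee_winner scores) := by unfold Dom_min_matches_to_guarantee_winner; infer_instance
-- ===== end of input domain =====

-- B replaces A's running-accumulator scan of the sorted tail by a binary search for the
-- largest qualifying 1-based index (objective: alternative algorithm, same O(n log n) cost).

-- ===== PORT A =====
-- the for-loop over sorted_scores[1:] with state (max_score, matches)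
def pvLoopA : List Int → Int → Int → Int
  | [], _, cnt => cnt
  | score :: rest, max_score, cnt =>
    if score + 3 ≥ max_score then pvLoopA rest (max_score + 3) (cnt + 1)
    else pvLoopA rest max_score cnt

def min_matches_to_guarantee_winner (scores : List Int) : Int :=
  if scores.length ≤ 1 then 0
  else
    let sorted_scores := PySem.List.sorted scores (fun x => x) true
    let max_score := (PySem.List.pyGet? sorted_scores 0).getD 0  -- index 0 is in range: length ≥ 2
    pvLoopA (PySem.List.slice sorted_scores (some 1) none) max_score 0

-- ===== PORT B =====
-- ok(i): team at 1-based index i of the descending-sorted list can still catch the leader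
-- (indices queried lie in [1, len-1], so pyGet? is always some; getD 0 is the in-range read)
def pvOkB (s : List Int) (i : Nat) : Bool :=
  decide ((PySem.List.pyGet? s (i : Int)).getD 0 + 3 ≥ (PySem.List.pyGet? s 0).getD 0 + 3 * ((i : Int) - 1))

-- the while-loop: binary search for the largest i with ok(i)
def pvBsearch (s : List Int) (lo hi : Nat) : Nat :=
  if lo < hi then
    if pvOkB s ((lo + hi + 1) / 2) then pvBsearch s ((lo + hi + 1) / 2) hi
    else pvBsearch s lo ((lo + hi + 1) / 2 - 1)
  else lo
termination_by hi - lo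
decreasing_by all_goals omega

def min_matches_to_guarantee_winner_alt (scores : List Int) : Int :=
  if scores.length ≤ 1 then 0
  else
    let s := PySem.List.sorted scores (fun x => x) true
    if pvOkB s 1 then ((pvBsearch s 1 (s.length - 1) : Nat) : Int) else 0

-- ===== PRECONDITION & SPEC =====
def Spec_min_matches_to_guarantee_winner (scores : List Int) (out : Int) : Prop := out = min_matches_to_guarantee_winner_alt scores
instance (scores : List Int) (out : Int) : Decidable (Spec_min_matches_to_guarantee_winner scores out) := by unfold Spec_min_matches_to_guarantee_winner; infer_instance

-- ===== CLAIM (what is proved, stated in full; the proofs are below) =====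
def Claim_equal_min_matches_to_guarantee_winner : Prop := ∀ (scores : List Int), Dom_min_matches_to_guarantee_winner scores → Spec_min_matches_to_guarantee_winner scores (min_matches_to_guarantee_winner scores)

-- ===== LEMMAS AND PROOFS =====

lemma okB_iff (s : List Int) (i : Nat) :
    pvOkB s i = true ↔ s.getD 0 0 + 3 * ((i : Int) - 1) ≤ s.getD i 0 + 3 := by
  simp [pvOkB, PySem.List.pyGet?_zero, ← List.getD_eq_getElem?_getD, ge_iff_le]

lemma okB_mono (s : List Int) (hp : s.Pairwise (fun a b => b ≤ a))
    (i j : Nat) (_h1 : 1 ≤ i) (hij : i ≤ j) (hj : j < s.length)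
    (hok : pvOkB s j = true) : pvOkB s i = true := by
  rw [okB_iff] at hok ⊢
  rcases Nat.eq_or_lt_of_le hij with rfl | hlt
  · exact hok
  · have hge : s[j] ≤ s[i] := List.pairwise_iff_getElem.mp hp i j (by omega) hj hlt
    rw [List.getD_eq_getElem _ _ (by omega : i < s.length)]
    rw [List.getD_eq_getElem _ _ hj] at hok
    have : ((i : Int) - 1) ≤ ((j : Int) - 1) := by omega
    nlinarith
lemma loopA_allFail (t : List Int) :
    ∀ (m c : Int), (∀ x ∈ t, x + 3 < m) → pvLoopA t m c = c := by
  induction t with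
  | nil => intro m c _; rfl
  | cons x xs ih =>
    intro m c h
    have hx := h x (by simp)
    simp only [pvLoopA, if_neg (by omega : ¬ x + 3 ≥ m)]
    exact ih m c (fun y hy => h y (by simp [hy]))

lemma loopA_char (s : List Int) (L : Nat)
    (hp : s.Pairwise (fun a b => b ≤ a))
    (hL1 : ∀ i, 1 ≤ i → i ≤ L → pvOkB s i = true)
    (hL2 : L + 1 < s.length → pvOkB s (L + 1) = false)
    (hLn : L + 1 ≤ s.length) :
    ∀ d k c, L + 1 - k = d → 1 ≤ k → k ≤ L + 1 →
      pvLoopA (s.drop k) (s.getD 0 0 + 3 * ((k : Int) - 1)) c = c + ((L : Int) + 1 - (k : Int)) := by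
  intro d
  induction d with
  | zero =>
    intro k c hd hk1 hk2
    have hkL : k = L + 1 := by omega
    subst hkL
    by_cases hkn : s.length ≤ L + 1
    · rw [List.drop_eq_nil_of_le hkn]
      simp only [pvLoopA]; push_cast; ring
    · have hfail := hL2 (by omega)
      have hfail' : ¬ (s.getD 0 0 + 3 * (((L + 1 : Nat) : Int) - 1) ≤ s.getD (L + 1) 0 + 3) := by
        intro hc; rw [← okB_iff] at hc; simp [hc] at hfail
      rw [List.getD_eq_getElem _ _ (by omega : L + 1 < s.length)] at hfail'
      rw [loopA_allFail]
      · push_cast; ring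
      · intro x hx
        obtain ⟨j, hj, hxj⟩ := List.mem_iff_getElem.mp hx
        rw [List.getElem_drop] at hxj
        have hle : s[L + 1 + j]'(by simp at hj; omega) ≤ s[L + 1]'(by omega) := by
          rcases Nat.eq_zero_or_pos j with rfl | hjp
          · simp
          · exact List.pairwise_iff_getElem.mp hp (L + 1) (L + 1 + j) (by omega) (by simp at hj; omega) (by omega)
        omega
  | succ d ih =>
    intro k c hd hk1 hk2
    have hkL : k ≤ L := by omega
    have hkn : k < s.length := by omega
    have hok : pvOkB s k = true := hL1 k hk1 hkL
    rw [okB_iff, List.getD_eq_getElem _ _ hkn] at hok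
    rw [List.drop_eq_getElem_cons hkn]
    simp only [pvLoopA, if_pos (by omega : s[k] + 3 ≥ s.getD 0 0 + 3 * ((k : Int) - 1))]
    have heq : s.getD 0 0 + 3 * ((k : Int) - 1) + 3 = s.getD 0 0 + 3 * (((k + 1 : Nat) : Int) - 1) := by
      push_cast; ring
    rw [heq, ih (k + 1) (c + 1) (by omega) (by omega) (by omega)]
    push_cast; ring

lemma bsearch_char (s : List Int) (L nn : Nat)
    (Hiff : ∀ j, 1 ≤ j → j ≤ nn → (pvOkB s j = true ↔ j ≤ L)) :
    ∀ d lo hi, hi - lo ≤ d → 1 ≤ lo → lo ≤ L → L ≤ hi → hi ≤ nn → pvBsearch s lo hi = L := by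
  intro d
  induction d with
  | zero =>
    intro lo hi h h1 h2 h3 h4
    have : ¬ lo < hi := by omega
    rw [pvBsearch, if_neg this]; omega
  | succ d ih =>
    intro lo hi h h1 h2 h3 h4
    by_cases hlh : lo < hi
    · rw [pvBsearch, if_pos hlh]
      by_cases hok : pvOkB s ((lo + hi + 1) / 2) = true
      · have hmL : (lo + hi + 1) / 2 ≤ L := (Hiff _ (by omega) (by omega)).mp hok
        rw [if_pos hok]
        exact ih _ hi (by omega) (by omega) hmL h3 h4
      · have hmL : ¬ ((lo + hi + 1) / 2 ≤ L) := fun hc => hok ((Hiff _ (by omega) (by omega)).mpr hc)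
        rw [if_neg hok]
        exact ih lo _ (by omega) h1 h2 (by omega) (by omega)
    · rw [pvBsearch, if_neg hlh]; omega

-- ===== VERDICT (by name: the statement is the Claim_ definition above) =====
theorem min_matches_to_guarantee_winner_spec : Claim_equal_min_matches_to_guarantee_winner := by
  intro scores _
  unfold Spec_min_matches_to_guarantee_winner
  by_cases hn : scores.length ≤ 1
  · simp [min_matches_to_guarantee_winner, min_matches_to_guarantee_winner_alt, hn]
  · set s := PySem.List.sorted scores (fun x => x) true with hs
    have hlen : s.length = scores.length := PySem.List.length_sorted scores (fun x => x) true
    have hp : s.Pairwise (fun a b => b ≤ a) := by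
      have := PySem.List.sorted_pairwise_rev (xs := scores) (key := fun x => x)
      simpa using this
    have hn2 : 2 ≤ s.length := by omega
    simp only [min_matches_to_guarantee_winner, min_matches_to_guarantee_winner_alt, if_neg hn, ← hs]
    rw [PySem.List.slice_from_one, PySem.List.pyGet?_zero]
    have htail : s.tail = s.drop 1 := by simp
    have hget0 : (s[0]?).getD 0 = s.getD 0 0 := by simp [List.getD_eq_getElem?_getD]
    rw [htail, hget0]
    by_cases hok1 : pvOkB s 1 = true
    · -- L = greatest qualifying index
      set L := Nat.findGreatest (fun i => pvOkB s i = true) (s.length - 1) with hL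
      have hLle : L ≤ s.length - 1 := Nat.findGreatest_le _
      have hL1ge : 1 ≤ L := Nat.le_findGreatest (by omega) hok1
      have hPL : pvOkB s L = true := Nat.findGreatest_of_ne_zero hL.symm (by omega)
      have hL1 : ∀ i, 1 ≤ i → i ≤ L → pvOkB s i = true := fun i h1 h2 =>
        okB_mono s hp i L h1 h2 (by omega) hPL
      have hL2 : L + 1 < s.length → pvOkB s (L + 1) = false := by
        intro h
        have := Nat.findGreatest_is_greatest (by omega : L < L + 1) (by omega : L + 1 ≤ s.length - 1)
        simpa using this
      have hA := loopA_char s L hp hL1 hL2 (by omega) (L + 1 - 1) 1 0 rfl (by omega) (by omega)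
      have hB : pvBsearch s 1 (s.length - 1) = L := by
        apply bsearch_char s L (s.length - 1) _ (s.length - 1 - 1) 1 (s.length - 1)
          (by omega) (by omega) hL1ge (by omega) (by omega)
        intro j hj1 hj2
        constructor
        · intro hok
          by_contra hc
          exact (Nat.findGreatest_is_greatest (by omega : L < j) hj2) hok
        · intro hjL
          exact okB_mono s hp j L hj1 hjL (by omega) hPL
      have hm : s.getD 0 0 + 3 * (((1 : Nat) : Int) - 1) = s.getD 0 0 := by push_cast; ring
      rw [hm] at hA
      rw [if_pos hok1, hB, hA]
      push_cast
      ring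
    · -- nobody qualifies: apply loopA_char with L = 0
      have hL2 : 0 + 1 < s.length → pvOkB s (0 + 1) = false := by
        intro _; simpa using hok1
      have hA := loopA_char s 0 hp (fun i h1 h2 => absurd (le_trans h1 h2) (by omega))
        hL2 (by omega) 0 1 0 rfl (by omega) (by omega)
      have hm : s.getD 0 0 + 3 * (((1 : Nat) : Int) - 1) = s.getD 0 0 := by push_cast; ring
      rw [hm] at hA
      rw [if_neg hok1, hA]
      norm_num
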